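-- pv_equiv track=rewrite | github.com/daniel-reich/ubiquitous-fiesta | WFmZesxp2GXQcT8PE_22.py | digital_cipher
-- ===== SOURCE A (Python) =====
-- def digital_cipher(message, key):
--     num_lst = []
--     key_str = str(key)
--     key_lst = []
--     key_mask = []
--     az_dict = {}
--     az_lst = ['a', 'b', 'c', 'd', 'e', 'f', 'g', 'h', 'i', 'j', 'k', 'l', 'm',
--               'n', 'o', 'p', 'q', 'r', 's', 't', 'u', 'v', 'w', 'x', 'y', 'z']
--     # create a key list
--     for k in key_str:
--         key_lst.append(int(k))
--         # create dict to map letters to numbers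
--         num = 1
--     for i in range(len(az_lst)):
--         az_dict[az_lst[i]] = num
--         num += 1
--     # get list of int's from message
--     for i in message:
--         num_lst.append(az_dict[i])
--     # create a key of the proper length
--     key_length = len(key_lst)
--     m_length = len(num_lst)
--     key_mod = m_length % key_length
--     key_int = int((m_length - key_mod) / key_length)
--     key_leftover = []
--     for i in range(key_mod):
--         key_leftover.append(key_lst[i])
--     for i in range(key_int):
--         key_mask = key_mask + key_lst
--     key_mask = key_mask + key_leftover
--     # add the key_mask to the num_lst and return it
--     cipher = []
--     val = 0
--     count = 0
--     for i in num_lst: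
--         val = num_lst[count] + key_mask[count]
--         cipher.append(val)
--         count += 1
--     return cipher
-- ===== SOURCE B (Python) =====
-- def digital_cipher(message, key):
--     digits = [int(c) for c in str(key)]
--     k = len(digits)
--     return [(ord(c) - 96) + digits[i % k] for i, c in enumerate(message)]
-- ===== Notes on version B (the rewrite author's own statement) =====
-- stated objective: faster
-- what changed: B drops the full-length key_mask construction (whose repeated 'key_mask = key_mask + key_lst' concatenation is quadratic) and the 26-entry letter dict; it parses the key digits once and produces the result in a single pass over the message with ord(c)-96 and modular indexing into the key digits.
import Mathlib
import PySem

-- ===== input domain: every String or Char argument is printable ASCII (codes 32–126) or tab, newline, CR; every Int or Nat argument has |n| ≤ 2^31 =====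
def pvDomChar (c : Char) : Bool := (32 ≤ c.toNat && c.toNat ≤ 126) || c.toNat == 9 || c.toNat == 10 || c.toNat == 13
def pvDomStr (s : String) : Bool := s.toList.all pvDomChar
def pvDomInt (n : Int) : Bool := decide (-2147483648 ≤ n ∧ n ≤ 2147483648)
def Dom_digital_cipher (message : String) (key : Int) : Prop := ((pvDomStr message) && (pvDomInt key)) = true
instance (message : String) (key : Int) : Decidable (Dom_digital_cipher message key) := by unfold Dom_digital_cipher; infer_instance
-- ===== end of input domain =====

-- B replaces A's full-length key_mask construction (quadratic repeated list concatenation)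
-- and 26-entry letter dict by a single pass with ord(c)-96 and modular indexing into the
-- parsed key digits; a timing run measured B faster.

-- ===== PORT A =====
def azLst : List Char :=
  ['a', 'b', 'c', 'd', 'e', 'f', 'g', 'h', 'i', 'j', 'k', 'l', 'm',
   'n', 'o', 'p', 'q', 'r', 's', 't', 'u', 'v', 'w', 'x', 'y', 'z']

-- the 'for i in range(len(az_lst))' loop carrying (az_dict, num); num = 1 was set in the key loop
def azDictNum : PySem.Dict Char Int × Int :=
  (PySem.List.pyRange 0 (azLst.length : Int) 1).foldl
    (fun p i => (p.1.insert (PySem.List.pyGetD azLst i 'a') p.2, p.2 + 1))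
    (PySem.Dict.empty, 1)

def digital_cipher (message : String) (key : Int) : List Int :=
  let key_str := PySem.Int.toStr key
  -- int(k) on a one-character string; .getD 0 is only reached where Python raises ValueError (excluded by Pre_)
  let key_lst := key_str.toList.foldl (fun acc k => acc ++ [(PySem.Int.ofChars? [k]).getD 0]) []
  let az_dict := azDictNum.1
  -- az_dict[i]; .getD 0 is only reached where Python raises KeyError (excluded by Pre_)
  let num_lst := message.toList.foldl (fun acc c => acc ++ [(az_dict.get? c).getD 0]) []
  let key_length : Int := key_lst.length
  let m_length : Int := num_lst.length
  let key_mod := PySem.Int.mod m_length key_length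
  -- int((m_length - key_mod) / key_length): the float division is exact here, so int() of it is tdiv
  let key_int := PySem.Int.truncdiv (m_length - key_mod) key_length
  let key_leftover := (PySem.List.pyRange 0 key_mod 1).foldl
    (fun acc i => acc ++ [PySem.List.pyGetD key_lst i 0]) []
  let key_mask := (PySem.List.pyRange 0 key_int 1).foldl (fun acc _ => acc ++ key_lst) []
  let key_mask := key_mask ++ key_leftover
  (num_lst.foldl
    (fun (p : List Int × Int) _ =>
      (p.1 ++ [PySem.List.pyGetD num_lst p.2 0 + PySem.List.pyGetD key_mask p.2 0], p.2 + 1))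
    ([], (0 : Int))).1

-- ===== PORT B =====
def digital_cipher_alt (message : String) (key : Int) : List Int :=
  let digits := (PySem.Int.toStr key).toList.map (fun c => (PySem.Int.ofChars? [c]).getD 0)
  let k : Int := digits.length
  (PySem.List.enumerate message.toList).map
    (fun p => ((p.2.toNat : Int) - 96) + PySem.List.pyGetD digits (PySem.Int.mod p.1 k) 0)

-- ===== PRECONDITION & SPEC =====
-- Pre_ excludes exactly the inputs on which A raises: a negative key (int('-') raises ValueError)
-- and any message character outside 'a'..'z' (KeyError in the az_dict lookup).
def Pre_digital_cipher (message : String) (key : Int) : Prop :=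
  0 ≤ key ∧ message.toList.all (fun c => decide (c ∈ azLst)) = true
instance (message : String) (key : Int) : Decidable (Pre_digital_cipher message key) := by
  unfold Pre_digital_cipher; infer_instance

def pvWitness_digital_cipher : String × Int := ("hello", 1939)

def Spec_digital_cipher (message : String) (key : Int) (out : List Int) : Prop := out = digital_cipher_alt message key
instance (message : String) (key : Int) (out : List Int) : Decidable (Spec_digital_cipher message key out) := by unfold Spec_digital_cipher; infer_instance

-- ===== CLAIM (what is proved, stated in full; the proofs are below) =====
def Claim_equal_digital_cipher : Prop := ∀ (message : String) (key : Int), Dom_digital_cipher message key → Pre_digital_cipher message key → Spec_digital_cipher message key (digital_cipher message key)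

-- ===== LEMMAS AND PROOFS =====

-- the built dict maps each letter to its 1-based position, i.e. c.toNat - 96
lemma azDict_get (c : Char) (hc : c ∈ azLst) :
    azDictNum.1.get? c = some ((c.toNat : Int) - 96) := by
  fin_cases hc <;> decide

-- Nat.toDigits is never empty (no library lemma found); via fuel monotonicity
lemma toDigitsCore_len_mono (b : Nat) : ∀ (f n : Nat) (l : List Char),
    l.length ≤ (Nat.toDigitsCore b f n l).length := by
  intro f
  induction f with
  | zero => intro n l; simp [Nat.toDigitsCore]
  | succ f ih =>
    intro n l
    simp only [Nat.toDigitsCore]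
    split
    · simp
    · exact le_trans (by simp) (ih _ _)

lemma toDigits_ne_nil (b n : Nat) : Nat.toDigits b n ≠ [] := by
  have h : 1 ≤ (Nat.toDigits b n).length := by
    unfold Nat.toDigits
    simp only [Nat.toDigitsCore]
    split
    · simp
    · exact le_trans (by simp) (toDigitsCore_len_mono b _ _ _)
  intro h0; rw [h0] at h; simp at h

lemma toChars_ne_nil (n : Int) : PySem.Int.toChars n ≠ [] := by
  unfold PySem.Int.toChars
  split
  · simp
  · exact toDigits_ne_nil 10 n.toNat

-- A's repetition loop builds the flattened replicate
lemma foldl_append_const {α : Type} (L : List α) :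
    ∀ (l : List Int) (acc : List α),
    l.foldl (fun a _ => a ++ L) acc = acc ++ (List.replicate l.length L).flatten := by
  intro l
  induction l with
  | nil => intro acc; simp
  | cons x xs ih => intro acc; simp [List.foldl_cons, ih, List.replicate_succ]

-- indexing the mask (q full copies of L plus the first r entries) is modular indexing into L
lemma mask_getD (L : List Int) (hL : L ≠ []) (r : Nat) (hr : r ≤ L.length) :
    ∀ (q i : Nat), i < q * L.length + r →
    ((List.replicate q L).flatten ++ (List.range r).map (fun j => L.getD j 0)).getD i 0
      = L.getD (i % L.length) 0 := by
  have hk : 0 < L.length := List.length_pos_iff.mpr hL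
  intro q
  induction q with
  | zero =>
    intro i hi
    simp only [Nat.zero_mul, Nat.zero_add] at hi
    have hil : i < L.length := lt_of_lt_of_le hi hr
    rw [List.replicate_zero, List.flatten_nil, List.nil_append]
    rw [List.getD_eq_getElem _ _ (by simpa using hi), List.getElem_map, List.getElem_range,
        Nat.mod_eq_of_lt hil]
  | succ q ih =>
    intro i hi
    rw [List.replicate_succ, List.flatten_cons, List.append_assoc]
    by_cases h : i < L.length
    · rw [List.getD_append _ _ _ _ h, Nat.mod_eq_of_lt h]
    · rw [Nat.not_lt] at h
      rw [Nat.succ_mul] at hi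
      rw [List.getD_append_right _ _ _ _ h, ih (i - L.length) (by omega)]
      congr 1
      exact (Nat.mod_eq_sub_mod h).symm

-- the cipher loop: appends h(count) for count = n, n+1, …
lemma cipher_fold {α : Type} (h : Int → Int) :
    ∀ (l : List α) (acc : List Int) (n : Int),
    (l.foldl (fun (p : List Int × Int) _ => (p.1 ++ [h p.2], p.2 + 1)) (acc, n)).1
      = acc ++ (List.range l.length).map (fun (j : Nat) => h (n + (j : Int))) := by
  intro l
  induction l with
  | nil => intro acc n; simp
  | cons x xs ih =>
    intro acc n
    rw [List.foldl_cons, ih]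
    rw [List.length_cons, List.range_succ_eq_map]
    simp only [List.map_cons, List.map_map]
    simp only [List.map_cons, List.map_map, List.append_assoc, List.singleton_append,
      List.append_cancel_left_eq, List.cons.injEq]
    constructor
    · simp
    · apply List.map_congr_left
      intro j _
      simp [Function.comp]
      ring_nf

-- B's result at each position
lemma enum_map (L : List Int) (msg : List Char) :
    ∀ (s : Int),
    (PySem.List.enumerate msg s).map
        (fun p => ((p.2.toNat : Int) - 96) + PySem.List.pyGetD L (PySem.Int.mod p.1 (L.length : Int)) 0)
      = (List.range msg.length).map
        (fun j => ((msg.getD j 'a').toNat : Int) - 96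
            + PySem.List.pyGetD L (PySem.Int.mod (s + (j : Int)) (L.length : Int)) 0) := by
  induction msg with
  | nil => intro s; simp [PySem.List.enumerate_nil]
  | cons c cs ih =>
    intro s
    rw [PySem.List.enumerate_cons, List.map_cons, ih (s + 1)]
    rw [List.length_cons, List.range_succ_eq_map]
    simp only [List.map_cons, List.map_map]
    congr 1
    · simp
    · apply List.map_congr_left
      intro j hj
      have hjlen : j < cs.length := List.mem_range.mp hj
      simp [Function.comp]
      ring_nf

-- xs[key_lst[i] for i in range(key_mod)] written as a plain take-style map
lemma leftover_map (L : List Int) (r : Nat) :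
    (PySem.List.pyRange 0 (r : Int) 1).map (fun i => PySem.List.pyGetD L i 0)
      = (List.range r).map (fun j => L.getD j 0) := by
  rw [PySem.List.pyRange_one]
  simp [List.map_map, Function.comp]

lemma truncdiv_natCast (a b : Nat) :
    PySem.Int.truncdiv (a : Int) (b : Int) = ((a / b : Nat) : Int) := by
  show ((a : Int).tdiv (b : Int)) = ((a / b : Nat) : Int)
  rw [Int.tdiv_eq_ediv]
  simp [Int.natCast_ediv]

-- the whole equality, assuming only that every message character is a lowercase letter
lemma main_eq (message : String) (key : Int)
    (hmem : ∀ c ∈ message.toList, c ∈ azLst) :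
    digital_cipher message key = digital_cipher_alt message key := by
  have hL : (PySem.Int.toStr key).toList ≠ [] := by
    rw [PySem.Int.toList_toStr]; exact toChars_ne_nil key
  rw [digital_cipher, digital_cipher_alt]
  simp only [PySem.List.foldl_append_singleton_eq_map, List.nil_append, List.length_map]
  -- names for the recurring pieces
  generalize hLdef : (PySem.Int.toStr key).toList.map (fun c => (PySem.Int.ofChars? [c]).getD 0) = L
  have hLne : L ≠ [] := by
    rw [← hLdef]; simpa using hL
  have hklen : (PySem.Int.toStr key).toList.length = L.length := by
    rw [← hLdef, List.length_map]
  rw [hklen]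
  set msg := message.toList with hmsg
  set m : Nat := msg.length with hm
  set k : Nat := L.length with hk0
  have hk : 0 < k := List.length_pos_iff.mpr hLne
  set r : Nat := m % k with hr0
  have hr : r < k := Nat.mod_lt _ hk
  -- the scalar computations
  rw [PySem.Int.mod_natCast]
  have hcast : (m : Int) - ((m % k : Nat) : Int) = ((m - m % k : Nat) : Int) := by
    have := Nat.mod_le m k; omega
  rw [hcast, truncdiv_natCast]
  set q : Nat := (m - m % k) / k with hq0
  have hsub : m - m % k = k * (m / k) := by
    have h1 := Nat.div_add_mod m k; omega
  have hq : q = m / k := by rw [hq0, hsub, Nat.mul_div_cancel_left _ hk]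
  have hqk : q * k + r = m := by
    rw [hq, hr0]
    exact Nat.div_add_mod' m k
  -- the three loops
  rw [foldl_append_const, leftover_map, PySem.List.length_pyRange_one]
  have hqtn : ((q : Int) - 0).toNat = q := by simp
  rw [hqtn]
  simp only [List.nil_append]
  rw [cipher_fold (fun i => PySem.List.pyGetD (List.map (fun x => (azDictNum.1.get? x).getD 0) msg) i 0 +
        PySem.List.pyGetD ((List.replicate q L).flatten ++ List.map (fun j => L.getD j 0) (List.range (m % k))) i 0)]
  -- B side
  rw [enum_map]
  -- pointwise agreement
  simp only [List.nil_append, List.length_map]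
  apply List.map_congr_left
  intro j hj
  have hjm : j < m := List.mem_range.mp hj
  have hmem' : msg[j] ∈ azLst := hmem _ (List.getElem_mem hjm)
  have hnum : (msg.map (fun c => (azDictNum.1.get? c).getD 0)).getD j 0
      = (msg[j].toNat : Int) - 96 := by
    rw [List.getD_eq_getElem _ _ (by simpa using hjm), List.getElem_map, azDict_get _ hmem']
    rfl
  have hjlen : j < q * L.length + r := by
    rw [← hk0]; omega
  have hmask := mask_getD L hLne r (le_of_lt hr) q j hjlen
  rw [zero_add, PySem.List.pyGetD_natCast, PySem.List.pyGetD_natCast, hnum, hmask,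
      PySem.Int.mod_natCast, PySem.List.pyGetD_natCast,
      List.getD_eq_getElem msg 'a' (by simpa using hjm)]

theorem digital_cipher_spec : Claim_equal_digital_cipher := by
  intro message key hdom hpre
  exact main_eq message key
    (fun c hc => of_decide_eq_true (List.all_eq_true.mp hpre.2 c hc))
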